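-- pv_equiv track=rewrite | github.com/Joshua-White-TRP/JW-AdventOfCode | 2023/13/2.py | calculate_mirror_value
-- ===== SOURCE A (Python) =====
-- def calculate_mirror_start(matches, edge_match):
--     x, y = edge_match
--     while x+1 != y and [x+1,y-1] in matches:
--         x += 1
--         y -=1
--     return x+1 if x+1 == y else None
--
-- def calculate_mirror_value(map, forbidden_answer):
--     row_count = len(map)
--     col_count = len(map[0])
--
--     row_matches = []
--     for i in range(row_count):
--         for j in range(i+1, row_count, 2):
--             if all([map[i][k] == map[j][k] for k in range(col_count)]):
--                 row_matches.append([i, j])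
--
--     if len(row_matches) > 0:
--         for edge_match in [x for x in row_matches if x[0] == 0 or x[1] == row_count - 1]:
--             result = calculate_mirror_start(row_matches, edge_match)
--             if result and (forbidden_answer == None or result * 100 != forbidden_answer):
--                 return result * 100
--
--     column_matches = []
--     for i in range(col_count):
--         for j in range(i+1, col_count, 2):
--             if all([map[k][i] == map[k][j] for k in range(row_count)]):
--                 column_matches.append([i, j])
--
--     if len(column_matches) > 0:
--         for edge_match in [x for x in column_matches if x[0] == 0 or x[1] == col_count - 1]:
--             result = calculate_mirror_start(column_matches, edge_match)
--             if result and (forbidden_answer == None or result != forbidden_answer):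
--                 return result
-- ===== SOURCE B (Python) =====
-- def calculate_mirror_value(map, forbidden_answer):
--     # Direct reflection scan: no matches table, no walk-inward helper.
--     # The grid is the first len(map[0]) characters of each row.
--     w = len(map[0])
--     rows = [row[:w] for row in map]
--     cols = [[row[i] for row in rows] for i in range(w)]
--     for lines, mult in ((rows, 100), (cols, 1)):
--         n = len(lines)
--         for m in range(1, n):
--             k = min(m, n - m)
--             if all(lines[m - 1 - d] == lines[m + d] for d in range(k)):
--                 v = m * mult
--                 if forbidden_answer is None or v != forbidden_answer:
--                     return v
--     return None
-- ===== Notes on version B (the rewrite author's own statement) =====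
-- stated objective: faster
-- what changed: Drops A's precomputed odd-distance matches tables, the edge-pair filter and the walk-inward helper (whose 'pair in matches' test scans the quadratic-size table); B tests each candidate mirror line m = 1..n-1 directly (rows first, then columns), comparing reflected lines until one side runs out, and returns at the first admissible line.
import Mathlib
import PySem

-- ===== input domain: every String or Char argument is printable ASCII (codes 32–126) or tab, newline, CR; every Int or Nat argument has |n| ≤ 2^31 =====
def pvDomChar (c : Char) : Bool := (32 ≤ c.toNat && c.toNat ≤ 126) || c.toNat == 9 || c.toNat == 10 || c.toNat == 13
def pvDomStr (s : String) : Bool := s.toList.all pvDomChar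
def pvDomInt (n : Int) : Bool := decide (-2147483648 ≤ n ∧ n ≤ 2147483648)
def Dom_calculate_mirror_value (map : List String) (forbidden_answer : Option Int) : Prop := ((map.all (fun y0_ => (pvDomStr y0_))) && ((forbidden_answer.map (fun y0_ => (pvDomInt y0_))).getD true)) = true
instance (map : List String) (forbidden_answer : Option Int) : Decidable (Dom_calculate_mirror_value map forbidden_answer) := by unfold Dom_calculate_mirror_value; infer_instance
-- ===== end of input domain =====

-- B drops A's precomputed odd-distance matches tables and the walk-inward helper and tests each
-- candidate mirror line directly, returning at the first admissible one (measured faster: no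
-- quadratic-size tables and no list-membership scans over them).

-- ===== PORT A =====

-- map[i][k] as A indexes characters (none = IndexError; unreachable under Pre_)
def pvCharAt (map : List String) (i k : Int) : Option Char :=
  (PySem.List.pyGet? map i).bind (fun s => PySem.Str.pyGet? s k)

-- the 'while' loop of calculate_mirror_start, ported with fuel; the fuel (y - x).toNat passed at
-- the call site always suffices: each iteration decreases y - x by 2 and A's loop runs only while
-- the remaining pair is a match, which its callers' edge pairs bound by y - x iterations
def pvCmsGo (mts : List (Int × Int)) (x y : Int) : Nat → Option Int
  | 0 => if x + 1 = y then some (x + 1) else none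
  | fuel+1 =>
    if x + 1 ≠ y ∧ (x + 1, y - 1) ∈ mts then
      pvCmsGo mts (x + 1) (y - 1) fuel
    else if x + 1 = y then some (x + 1) else none

def calculate_mirror_start (mts : List (Int × Int)) (edge_match : Int × Int) : Option Int :=
  pvCmsGo mts edge_match.1 edge_match.2 (edge_match.2 - edge_match.1).toNat

-- A's row_matches and column_matches loops are textually identical up to the element-equality
-- test, so they are ported once, with that test as a parameter
def pvMatchesA (eqf : Int → Int → Bool) (n : Int) : List (Int × Int) :=
  (PySem.List.pyRange 0 n 1).foldl (fun acc i =>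
    (PySem.List.pyRange (i + 1) n 2).foldl (fun acc2 j =>
      if eqf i j then acc2 ++ [(i, j)] else acc2) acc) []

-- 'for edge_match in [...]: result = ...; if result and (forbidden is None or result*mult != forbidden): return result*mult'
def pvTryEdges (mts : List (Int × Int)) (mult : Int) (forbidden : Option Int) :
    List (Int × Int) → Option Int
  | [] => none
  | e :: rest =>
    match calculate_mirror_start mts e with
    | some result =>
      if result ≠ 0 ∧ (forbidden = none ∨ some (result * mult) ≠ forbidden) then
        some (result * mult)
      else pvTryEdges mts mult forbidden rest
    | none => pvTryEdges mts mult forbidden rest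

def calculate_mirror_value (map : List String) (forbidden_answer : Option Int) : Option Int :=
  let row_count : Int := map.length
  let col_count : Int := PySem.Str.len ((PySem.List.pyGet? map 0).getD "")  -- map[0]; IndexError on [] is outside Pre_
  let row_matches := pvMatchesA
    (fun i j => (PySem.List.pyRange 0 col_count 1).all
      (fun k => decide (pvCharAt map i k = pvCharAt map j k))) row_count
  let r1 : Option Int :=
    if row_matches.length > 0 then
      pvTryEdges row_matches 100 forbidden_answer
        (row_matches.filter (fun x => decide (x.1 = 0 ∨ x.2 = row_count - 1)))
    else none
  match r1 with
  | some v => some v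
  | none =>
    let column_matches := pvMatchesA
      (fun i j => (PySem.List.pyRange 0 row_count 1).all
        (fun k => decide (pvCharAt map k i = pvCharAt map k j))) col_count
    if column_matches.length > 0 then
      pvTryEdges column_matches 1 forbidden_answer
        (column_matches.filter (fun x => decide (x.1 = 0 ∨ x.2 = col_count - 1)))
    else none

-- ===== PORT B =====

-- 'for m in range(1, n): if all(lines[m-1-d] == lines[m+d] for d in range(min(m, n-m))): ...'
def pvScanB {α : Type} [DecidableEq α] (lines : List α) (mult : Int) (forbidden : Option Int) :
    List Int → Option Int
  | [] => none
  | m :: ms =>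
    let n : Int := lines.length
    if (PySem.List.pyRange 0 (min m (n - m)) 1).all
        (fun d => decide (PySem.List.pyGet? lines (m - 1 - d) = PySem.List.pyGet? lines (m + d))) then
      if forbidden = none ∨ some (m * mult) ≠ forbidden then some (m * mult)
      else pvScanB lines mult forbidden ms
    else pvScanB lines mult forbidden ms

def calculate_mirror_value_alt (map : List String) (forbidden_answer : Option Int) : Option Int :=
  let w : Int := PySem.Str.len ((PySem.List.pyGet? map 0).getD "")  -- len(map[0]); IndexError on [] is outside Pre_
  let rows : List String := map.map (fun row => PySem.Str.slice row none (some w))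
  let cols : List (List Char) := (PySem.List.pyRange 0 w 1).map
    (fun i => rows.map (fun row => (PySem.Str.pyGet? row i).getD ' '))  -- row[i]; 0 ≤ i < w = len(row) is in range
  match pvScanB rows 100 forbidden_answer (PySem.List.pyRange 1 (rows.length : Int) 1) with
  | some v => some v
  | none => pvScanB cols 1 forbidden_answer (PySem.List.pyRange 1 (cols.length : Int) 1)

-- ===== PRECONDITION & SPEC =====

-- Pre_ excludes exactly the inputs on which the Python A raises IndexError: the empty map
-- (map[0]), and maps with some row shorter than row 0 (every row is indexed up to len(map[0])
-- by the match-building loops before anything is returned).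
def Pre_calculate_mirror_value (map : List String) (forbidden_answer : Option Int) : Prop :=
  map ≠ [] ∧ ∀ r ∈ map, PySem.Str.len (map.headD "") ≤ PySem.Str.len r

instance (map : List String) (forbidden_answer : Option Int) : Decidable (Pre_calculate_mirror_value map forbidden_answer) := by unfold Pre_calculate_mirror_value; infer_instance

def pvWitness_calculate_mirror_value : List String × Option Int := (["ab", "ab"], none)

def Spec_calculate_mirror_value (map : List String) (forbidden_answer : Option Int) (out : Option Int) : Prop := out = calculate_mirror_value_alt map forbidden_answer
instance (map : List String) (forbidden_answer : Option Int) (out : Option Int) : Decidable (Spec_calculate_mirror_value map forbidden_answer out) := by unfold Spec_calculate_mirror_value; infer_instance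

-- ===== CLAIM (what is proved, stated in full; the proofs are below) =====
def Claim_equal_calculate_mirror_value : Prop := ∀ (map : List String) (forbidden_answer : Option Int), Dom_calculate_mirror_value map forbidden_answer → Pre_calculate_mirror_value map forbidden_answer → Spec_calculate_mirror_value map forbidden_answer (calculate_mirror_value map forbidden_answer)

-- ===== LEMMAS AND PROOFS =====

-- proof-side: the edge pair A's filter selects for candidate mirror line m
def pvEdgeOf (n m : Int) : Int × Int :=
  if 2 * m ≤ n then (0, 2 * m - 1) else (2 * m - n, n - 1)

-- proof-side: B's scan with the line-equality test abstracted to e : Int → Int → Bool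
def pvScanGen (e : Int → Int → Bool) (n mult : Int) (forbidden : Option Int) : List Int → Option Int
  | [] => none
  | m :: ms =>
    if (PySem.List.pyRange 0 (min m (n - m)) 1).all (fun d => e (m - 1 - d) (m + d)) then
      if forbidden = none ∨ some (m * mult) ≠ forbidden then some (m * mult)
      else pvScanGen e n mult forbidden ms
    else pvScanGen e n mult forbidden ms

-- two strictly increasing integer lists with the same members are equal
lemma pv_sorted_eq (l1 l2 : List Int) (h1 : l1.Pairwise (· < ·)) (h2 : l2.Pairwise (· < ·))
    (h : ∀ x, x ∈ l1 ↔ x ∈ l2) : l1 = l2 :=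
  List.Perm.eq_of_pairwise
    (fun a b _ _ (x : a < b) (y : b < a) => absurd y (not_lt.2 (le_of_lt x))) h1 h2
    ((List.perm_ext_iff_of_nodup (h1.imp ne_of_lt) (h2.imp ne_of_lt)).2 h)

lemma pvMatchesA_eq_flatMap (e : Int → Int → Bool) (n : Int) :
    pvMatchesA e n = (PySem.List.pyRange 0 n 1).flatMap
      (fun i => ((PySem.List.pyRange (i + 1) n 2).filter (fun j => e i j)).map (fun j => (i, j))) := by
  unfold pvMatchesA
  rw [PySem.List.foldl_congr_mem _ _
    (fun acc i => acc ++ ((PySem.List.pyRange (i + 1) n 2).filter (fun j => e i j)).map (fun j => (i, j))) _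
    (fun acc i _ => PySem.List.foldl_append_if (fun j => e i j) (fun j => (i, j)) _ acc)]
  exact PySem.List.foldl_append_eq_flatMap _ _ []

lemma pv_mem_matchesA (e : Int → Int → Bool) (n a b : Int) :
    (a, b) ∈ pvMatchesA e n ↔ 0 ≤ a ∧ a < b ∧ b < n ∧ (2 ∣ b - a - 1) ∧ e a b = true := by
  rw [pvMatchesA_eq_flatMap]
  simp only [List.mem_flatMap, List.mem_map, List.mem_filter,
    PySem.List.mem_pyRange_one, PySem.List.mem_pyRange_iff_of_pos (by norm_num : (0:Int) < 2)]
  constructor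
  · rintro ⟨i, ⟨hi0, hin⟩, j, ⟨⟨hj1, hj2, hj3⟩, hej⟩, heq⟩
    rw [Prod.mk.injEq] at heq
    obtain ⟨rfl, rfl⟩ := heq
    exact ⟨hi0, by omega, hj2, by omega, hej⟩
  · rintro ⟨h0, hab, hbn, hd, he⟩
    exact ⟨a, ⟨h0, by omega⟩, ⟨b, ⟨⟨by omega, by omega, by omega⟩, he⟩, rfl⟩⟩

lemma pv_pairwise_pyRange_two (a b : Int) : (PySem.List.pyRange a b 2).Pairwise (· < ·) := by
  rw [PySem.List.pyRange_of_pos a b (by norm_num)]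
  exact (List.pairwise_lt_range).map _ (fun {x y} (hxy : x < y) => by omega)

lemma pv_pyRange_shift (a b : Int) :
    PySem.List.pyRange (a + 1) (b + 1) 1 = (PySem.List.pyRange a b 1).map (· + 1) := by
  simp only [PySem.List.pyRange_one, List.map_map]
  have h : b + 1 - (a + 1) = b - a := by ring
  rw [h]
  exact List.map_congr_left (fun k _ => by simp; ring)

lemma pv_pyRange_odds (n : Int) :
    PySem.List.pyRange 1 n 2 = (PySem.List.pyRange 1 (n / 2 + 1) 1).map (fun m => 2 * m - 1) := by
  apply pv_sorted_eq
  · exact pv_pairwise_pyRange_two 1 n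
  · exact (PySem.List.pairwise_lt_pyRange_one _ _).map _ (fun {x y} (hxy : x < y) => by omega)
  · intro x
    rw [PySem.List.mem_pyRange_iff_of_pos (by norm_num)]
    simp only [List.mem_map, PySem.List.mem_pyRange_one]
    constructor
    · rintro ⟨hx1, hx2, hd⟩
      exact ⟨(x + 1) / 2, by omega, by omega⟩
    · rintro ⟨m, ⟨hm1, hm2⟩, rfl⟩
      refine ⟨by omega, by omega, by omega⟩

lemma pv_pyRange_evens_filter (n : Int) :
    (PySem.List.pyRange 1 n 1).filter
        (fun i => decide (i + 1 ≤ n - 1) && decide ((2 : Int) ∣ n - 1 - (i + 1)))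
      = (PySem.List.pyRange (n / 2 + 1) n 1).map (fun m => 2 * m - n) := by
  apply pv_sorted_eq
  · exact (PySem.List.pairwise_lt_pyRange_one _ _).filter _
  · exact (PySem.List.pairwise_lt_pyRange_one _ _).map _ (fun {x y} (hxy : x < y) => by omega)
  · intro x
    simp only [List.mem_filter, List.mem_map, PySem.List.mem_pyRange_one,
      Bool.and_eq_true, decide_eq_true_eq]
    constructor
    · rintro ⟨⟨hx1, hx2⟩, hle, hd⟩
      exact ⟨(x + n) / 2, by omega, by omega⟩
    · rintro ⟨m, ⟨hm1, hm2⟩, rfl⟩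
      refine ⟨⟨by omega, by omega⟩, by omega, by omega⟩

lemma pv_filter_filter_single (l : List Int) (hnd : l.Nodup) (q : Int → Bool) (c : Int) :
    (l.filter q).filter (fun j => j == c) = if c ∈ l ∧ q c = true then [c] else [] := by
  induction l with
  | nil => simp
  | cons x xs ih =>
    rw [List.nodup_cons] at hnd
    have ih' := ih hnd.2
    by_cases hq : q x = true
    · by_cases hx : x = c
      · subst hx
        simp [hq, ih', hnd.1]
      · simp only [List.filter_cons, hq, if_pos, List.mem_cons]
        simp only [show (x == c) = false from beq_eq_false_iff_ne.2 hx,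
          Bool.false_eq_true, if_false]
        rw [ih']
        have hiff : (c = x ∨ c ∈ xs) ∧ q c = true ↔ c ∈ xs ∧ q c = true := by
          constructor
          · rintro ⟨hc | hc, hqc⟩
            · exact absurd hc.symm hx
            · exact ⟨hc, hqc⟩
          · exact fun ⟨hc, hqc⟩ => ⟨Or.inr hc, hqc⟩
        simp only [hiff]
    · simp only [List.filter_cons, hq, Bool.false_eq_true, if_false]
      rw [ih']
      by_cases hx : x = c
      · subst hx
        simp [hq]
      · simp only [List.mem_cons]
        have hiff : (c = x ∨ c ∈ xs) ∧ q c = true ↔ c ∈ xs ∧ q c = true := by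
          constructor
          · rintro ⟨hc | hc, hqc⟩
            · exact absurd hc.symm hx
            · exact ⟨hc, hqc⟩
          · exact fun ⟨hc, hqc⟩ => ⟨Or.inr hc, hqc⟩
        simp only [hiff]

lemma pv_flatMap_if_singleton {β : Type} (l : List Int) (P : Int → Prop) [DecidablePred P]
    (f : Int → β) :
    l.flatMap (fun i => if P i then [f i] else []) = (l.filter (fun i => decide (P i))).map f := by
  induction l with
  | nil => simp
  | cons x xs ih =>
    by_cases h : P x <;> simp [h, ih]

lemma pv_all_congr {l : List Int} {p q : Int → Bool} (h : ∀ x ∈ l, p x = q x) :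
    l.all p = l.all q := by
  induction l with
  | nil => rfl
  | cons x xs ih =>
    simp only [List.all_cons, h x List.mem_cons_self,
      ih (fun y hy => h y (List.mem_cons_of_mem x hy))]

lemma pvCharAt_eq (map : List String) (a k : Int) (ha : 0 ≤ a) (hA : a.toNat < map.length)
    (hk : 0 ≤ k) :
    pvCharAt map a k = map[a.toNat].toList[k.toNat]? := by
  unfold pvCharAt
  rw [PySem.List.pyGet?_of_nonneg _ ha, List.getElem?_eq_getElem hA]
  simp only [Option.bind_some]
  rw [PySem.Str.pyGet?_eq, PySem.Chars.pyGet?_eq_listPyGet?, PySem.List.pyGet?_of_nonneg _ hk]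

lemma pv_head_getD (map : List String) (hne : map ≠ []) :
    (PySem.List.pyGet? map 0).getD "" = map.headD "" := by
  rw [PySem.List.pyGet?_zero]
  cases map with
  | nil => exact absurd rfl hne
  | cons x xs => rfl

lemma pv_take_eq_iff (la lb : List Char) (W : Nat) :
    la.take W = lb.take W ↔ ∀ i : Nat, i < W → la[i]? = lb[i]? := by
  constructor
  · intro h i hi
    have h1 := congrArg (fun l => l[i]?) h
    simpa [List.getElem?_take, hi] using h1
  · intro h
    apply List.ext_getElem?
    intro i
    by_cases hi : i < W
    · simp only [List.getElem?_take, if_pos hi, h i hi]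
    · simp only [List.getElem?_take, if_neg hi]

lemma pv_row_eq (map : List String) (w : Int) (rows : List String)
    (hw : w = PySem.Str.len ((PySem.List.pyGet? map 0).getD ""))
    (hrows : rows = map.map (fun row => PySem.Str.slice row none (some w)))
    (hne : map ≠ [])
    (hlen : ∀ r ∈ map, PySem.Str.len (map.headD "") ≤ PySem.Str.len r)
    (a b : Int) (ha : 0 ≤ a) (hab : a < b) (hb : b < (map.length : Int)) :
    (PySem.List.pyRange 0 w 1).all (fun k => decide (pvCharAt map a k = pvCharAt map b k))
      = decide (PySem.List.pyGet? rows a = PySem.List.pyGet? rows b) := by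
  have hA : a.toNat < map.length := by omega
  have hB : b.toNat < map.length := by omega
  have hw0 : 0 ≤ w := by
    rw [hw, PySem.Str.len_eq]; positivity
  have hwle : ∀ r ∈ map, w ≤ (r.toList.length : Int) := by
    intro r hr
    have := hlen r hr
    rw [← pv_head_getD map hne, ← hw, PySem.Str.len_eq] at this
    exact this
  have hwa : w.toNat ≤ map[a.toNat].toList.length := by
    have := hwle _ (map.getElem_mem hA)
    omega
  have hwb : w.toNat ≤ map[b.toNat].toList.length := by
    have := hwle _ (map.getElem_mem hB)
    omega
  -- right-hand side: the two sliced rows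
  have hga : PySem.List.pyGet? rows a = some (PySem.Str.slice map[a.toNat] none (some w)) := by
    rw [hrows, PySem.List.pyGet?_of_nonneg _ ha, List.getElem?_map,
      List.getElem?_eq_getElem hA]
    rfl
  have hgb : PySem.List.pyGet? rows b = some (PySem.Str.slice map[b.toNat] none (some w)) := by
    rw [hrows, PySem.List.pyGet?_of_nonneg _ (by omega), List.getElem?_map,
      List.getElem?_eq_getElem hB]
    rfl
  have hsl : ∀ s : String, (PySem.Str.slice s none (some w)).toList = s.toList.take w.toNat := by
    intro s
    rw [PySem.Str.toList_slice, PySem.Chars.slice_eq_listSlice, PySem.List.slice_to _ hw0]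
  have hiff : ((PySem.List.pyRange 0 w 1).all
        (fun k => decide (pvCharAt map a k = pvCharAt map b k)) = true)
      ↔ (PySem.List.pyGet? rows a = PySem.List.pyGet? rows b) := by
    rw [hga, hgb]
    simp only [List.all_eq_true, PySem.List.mem_pyRange_one, decide_eq_true_eq,
      Option.some.injEq]
    rw [← String.toList_inj, hsl, hsl,
      pv_take_eq_iff _ _ w.toNat]
    constructor
    · intro h i hi
      have := h (i : Int) ⟨by omega, by omega⟩
      rw [pvCharAt_eq map a i ha hA (by omega), pvCharAt_eq map b i (by omega) hB (by omega)]
        at this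
      simpa using this
    · intro h k hk
      rw [pvCharAt_eq map a k ha hA (by omega), pvCharAt_eq map b k (by omega) hB (by omega)]
      exact h k.toNat (by omega)
  cases hL : ((PySem.List.pyRange 0 w 1).all
      (fun k => decide (pvCharAt map a k = pvCharAt map b k))) with
  | true => exact (decide_eq_true (hiff.mp hL)).symm
  | false =>
    cases hR : decide (PySem.List.pyGet? rows a = PySem.List.pyGet? rows b) with
    | true => exact absurd (hiff.mpr (of_decide_eq_true hR)) (by simp [hL])
    | false => rfl

lemma pv_col_eq (map : List String) (w : Int) (rows : List String) (cols : List (List Char))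
    (hw : w = PySem.Str.len ((PySem.List.pyGet? map 0).getD ""))
    (hrows : rows = map.map (fun row => PySem.Str.slice row none (some w)))
    (hcols : cols = (PySem.List.pyRange 0 w 1).map
      (fun i => rows.map (fun row => (PySem.Str.pyGet? row i).getD ' ')))
    (hne : map ≠ [])
    (hlen : ∀ r ∈ map, PySem.Str.len (map.headD "") ≤ PySem.Str.len r)
    (a b : Int) (ha : 0 ≤ a) (hab : a < b) (hb : b < w) :
    (PySem.List.pyRange 0 (map.length : Int) 1).all
        (fun k => decide (pvCharAt map k a = pvCharAt map k b))
      = decide (PySem.List.pyGet? cols a = PySem.List.pyGet? cols b) := by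
  have hw0 : 0 ≤ w := by rw [hw, PySem.Str.len_eq]; positivity
  have hwle : ∀ r ∈ map, w ≤ (r.toList.length : Int) := by
    intro r hr
    have := hlen r hr
    rw [← pv_head_getD map hne, ← hw, PySem.Str.len_eq] at this
    exact this
  have hget : ∀ c : Int, 0 ≤ c → c < w → PySem.List.pyGet? cols c
      = some (rows.map (fun row => (PySem.Str.pyGet? row c).getD ' ')) := by
    intro c hc0 hcw
    rw [hcols, PySem.List.pyGet?_of_nonneg _ hc0, List.getElem?_map,
      PySem.List.getElem?_pyRange_one]
    rw [if_pos (by omega)]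
    simp only [Option.map_some]
    have h0c : (0 : Int) + (c.toNat : Int) = c := by omega
    rw [h0c]
  have hval : ∀ (c : Int), 0 ≤ c → c < w → ∀ r : String,
      PySem.Str.pyGet? (PySem.Str.slice r none (some w)) c = r.toList[c.toNat]? := by
    intro c hc0 hcw r
    rw [PySem.Str.pyGet?_eq, PySem.Chars.pyGet?_eq_listPyGet?, PySem.Str.toList_slice,
      PySem.Chars.slice_eq_listSlice, PySem.List.slice_to _ hw0,
      PySem.List.pyGet?_of_nonneg _ hc0, List.getElem?_take, if_pos (by omega)]
  have hiff : ((PySem.List.pyRange 0 (map.length : Int) 1).all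
        (fun k => decide (pvCharAt map k a = pvCharAt map k b)) = true)
      ↔ (PySem.List.pyGet? cols a = PySem.List.pyGet? cols b) := by
    rw [hget a ha (by omega), hget b (by omega) hb]
    simp only [List.all_eq_true, PySem.List.mem_pyRange_one, decide_eq_true_eq,
      Option.some.injEq, hrows, List.map_map, List.map_inj_left, Function.comp_def]
    constructor
    · intro h r hr
      obtain ⟨t, ht, rfl⟩ := List.mem_iff_getElem.mp hr
      have hk := h (t : Int) ⟨by omega, by omega⟩
      rw [pvCharAt_eq map t a (by omega) (by simpa using ht) ha,
        pvCharAt_eq map t b (by omega) (by simpa using ht) (by omega)] at hk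
      rw [hval a ha (by omega), hval b (by omega) hb]
      simp only [Int.toNat_natCast] at hk
      rw [hk]
    · intro h k hk
      have hkN : k.toNat < map.length := by omega
      have hr : map[k.toNat] ∈ map := map.getElem_mem hkN
      have := h map[k.toNat] hr
      rw [hval a ha (by omega), hval b (by omega) hb] at this
      rw [pvCharAt_eq map k a (by omega) hkN ha,
        pvCharAt_eq map k b (by omega) hkN (by omega)]
      have hta : a.toNat < map[k.toNat].toList.length := by
        have := hwle _ hr
        omega
      have htb : b.toNat < map[k.toNat].toList.length := by
        have := hwle _ hr
        omega
      rw [List.getElem?_eq_getElem hta, List.getElem?_eq_getElem htb] at this ⊢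
      simpa using this
  cases hL : ((PySem.List.pyRange 0 (map.length : Int) 1).all
      (fun k => decide (pvCharAt map k a = pvCharAt map k b))) with
  | true => exact (decide_eq_true (hiff.mp hL)).symm
  | false =>
    cases hR : decide (PySem.List.pyGet? cols a = PySem.List.pyGet? cols b) with
    | true => exact absurd (hiff.mpr (of_decide_eq_true hR)) (by simp [hL])
    | false => rfl

lemma pvEdges_eq (e : Int → Int → Bool) (n : Int) (hn : 0 < n) :
    (pvMatchesA e n).filter (fun x => decide (x.1 = 0 ∨ x.2 = n - 1))
      = ((PySem.List.pyRange 1 n 1).filter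
          (fun m => e (pvEdgeOf n m).1 (pvEdgeOf n m).2)).map (pvEdgeOf n) := by
  rw [pvMatchesA_eq_flatMap]
  have hsplit0 : PySem.List.pyRange 0 n 1 = 0 :: PySem.List.pyRange 1 n 1 := by
    rw [PySem.List.pyRange_one_cons hn]; norm_num
  rw [hsplit0, List.flatMap_cons, List.filter_append, List.filter_flatMap]
  -- the i = 0 block: every pair (0, j) passes the edge filter
  have hb0 : (((PySem.List.pyRange (0 + 1) n 2).filter (fun j => e 0 j)).map
        (fun j => ((0 : Int), j))).filter (fun x => decide (x.1 = 0 ∨ x.2 = n - 1))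
      = ((PySem.List.pyRange 1 (n / 2 + 1) 1).filter (fun m => e 0 (2 * m - 1))).map
          (fun m => ((0 : Int), 2 * m - 1)) := by
    rw [List.filter_map]
    have htrue : ((fun x : Int × Int => decide (x.1 = 0 ∨ x.2 = n - 1)) ∘ (fun j => ((0:Int), j)))
        = fun _ => true := by
      funext j; simp
    rw [htrue]
    simp only [List.filter_true]
    norm_num
    rw [pv_pyRange_odds n, List.filter_map, List.map_map]
    simp only [Function.comp_def]
  rw [hb0]
  -- the i ≥ 1 blocks: only (i, n-1) survives, at most once per i
  have hblocks : (PySem.List.pyRange 1 n 1).flatMap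
        (fun i => (((PySem.List.pyRange (i + 1) n 2).filter (fun j => e i j)).map
          (fun j => (i, j))).filter (fun x => decide (x.1 = 0 ∨ x.2 = n - 1)))
      = (PySem.List.pyRange 1 n 1).flatMap
        (fun i => if ((n-1) ∈ PySem.List.pyRange (i + 1) n 2 ∧ e i (n-1) = true)
          then [(i, n-1)] else []) := by
    apply List.flatMap_congr
    intro i hi
    rw [PySem.List.mem_pyRange_one] at hi
    rw [List.filter_map]
    have hcomp : ((fun x : Int × Int => decide (x.1 = 0 ∨ x.2 = n - 1)) ∘ (fun j => (i, j)))
        = fun j => j == (n - 1) := by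
      funext j
      simp only [Function.comp_def]
      have : ¬ (i = 0) := by omega
      simp only [this, false_or]
      exact Eq.symm (Bool.beq_eq_decide_eq j (n-1))
    rw [hcomp,
      pv_filter_filter_single _ ((pv_pairwise_pyRange_two _ _).imp ne_of_lt) (fun j => e i j) (n-1)]
    split_ifs with h
    · simp
    · simp
  rw [hblocks, pv_flatMap_if_singleton]
  -- turn the membership condition into the closed parity/bound form, then into m-form
  have hfc : (PySem.List.pyRange 1 n 1).filter
        (fun i => decide ((n-1) ∈ PySem.List.pyRange (i + 1) n 2 ∧ e i (n-1) = true))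
      = ((PySem.List.pyRange 1 n 1).filter
          (fun i => decide (i + 1 ≤ n - 1) && decide ((2 : Int) ∣ n - 1 - (i + 1)))).filter
          (fun i => e i (n-1)) := by
    rw [List.filter_filter]
    apply List.filter_congr
    intro i hi
    rw [PySem.List.mem_pyRange_one] at hi
    have hlt : (n - 1 : Int) < n := by omega
    cases he : e i (n-1) with
    | true =>
      simp [PySem.List.mem_pyRange_iff_of_pos (by norm_num : (0:Int) < 2), hlt, and_comm]
    | false =>
      simp [PySem.List.mem_pyRange_iff_of_pos (by norm_num : (0:Int) < 2)]
  rw [hfc, pv_pyRange_evens_filter n, List.filter_map, List.map_map]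
  -- now assemble against the RHS split at n/2 + 1
  rw [PySem.List.pyRange_one_append 1 (n/2+1) n (by omega) (by omega), List.filter_append,
    List.map_append]
  have hpe1 : ∀ m ∈ PySem.List.pyRange 1 (n/2+1) 1, pvEdgeOf n m = (0, 2*m-1) := by
    intro m hm
    rw [PySem.List.mem_pyRange_one] at hm
    unfold pvEdgeOf
    rw [if_pos (by omega)]
  have hpe2 : ∀ m ∈ PySem.List.pyRange (n/2+1) n 1, pvEdgeOf n m = (2*m-n, n-1) := by
    intro m hm
    rw [PySem.List.mem_pyRange_one] at hm
    unfold pvEdgeOf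
    rw [if_neg (by omega)]
  have h1 : ((PySem.List.pyRange 1 (n/2+1) 1).filter
        (fun m => e (pvEdgeOf n m).1 (pvEdgeOf n m).2)).map (pvEdgeOf n)
      = ((PySem.List.pyRange 1 (n/2+1) 1).filter (fun m => e 0 (2*m-1))).map
          (fun m => ((0:Int), 2*m-1)) := by
    rw [List.filter_congr (q := fun m => e 0 (2*m-1)) (fun m hm => by rw [hpe1 m hm])]
    exact List.map_congr_left (fun m hm => hpe1 m (List.mem_filter.1 hm).1)
  have h2 : ((PySem.List.pyRange (n/2+1) n 1).filter
        (fun m => e (pvEdgeOf n m).1 (pvEdgeOf n m).2)).map (pvEdgeOf n)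
      = ((PySem.List.pyRange (n/2+1) n 1).filter (fun m => e (2*m-n) (n-1))).map
          (fun m => (2*m-n, n-1)) := by
    rw [List.filter_congr (q := fun m => e (2*m-n) (n-1)) (fun m hm => by rw [hpe2 m hm])]
    exact List.map_congr_left (fun m hm => hpe2 m (List.mem_filter.1 hm).1)
  rw [h1, h2]
  simp only [Function.comp_def]

lemma pvCmsGo_eq (mts : List (Int × Int)) (c : Nat) :
    ∀ (x y : Int) (fuel : Nat), y = x + 2 * (c : Int) + 1 → c ≤ fuel →
    pvCmsGo mts x y fuel =
      if (PySem.List.pyRange 1 ((c : Int) + 1) 1).all (fun t => decide ((x + t, y - t) ∈ mts))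
      then some (x + (c : Int) + 1) else none := by
  induction c with
  | zero =>
    intro x y fuel hy _
    subst hy
    simp only [Nat.cast_zero, mul_zero, zero_add, add_zero]
    rw [PySem.List.pyRange_one_eq_nil (by norm_num)]
    simp only [List.all_nil, if_true]
    cases fuel with
    | zero => simp [pvCmsGo]
    | succ f => simp [pvCmsGo]
  | succ c ih =>
    intro x y fuel hy hfuel
    cases fuel with
    | zero => omega
    | succ f =>
      have hne : x + 1 ≠ y := by push_cast at hy ⊢; omega
      have hcast : ((c + 1 : Nat) : Int) = (c : Int) + 1 := by push_cast; ring
      rw [hcast] at hy ⊢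
      by_cases hmem : (x + 1, y - 1) ∈ mts
      · rw [show pvCmsGo mts x y (f+1) = pvCmsGo mts (x+1) (y-1) f by
          simp [pvCmsGo, hne, hmem]]
        rw [ih (x+1) (y-1) f (by omega) (by omega)]
        have hsplit : PySem.List.pyRange 1 ((c : Int) + 1 + 1) 1
            = 1 :: PySem.List.pyRange 2 ((c : Int) + 1 + 1) 1 := by
          rw [PySem.List.pyRange_one_cons (by omega)]
          norm_num
        have hshift : PySem.List.pyRange 2 ((c : Int) + 1 + 1) 1
            = (PySem.List.pyRange 1 ((c : Int) + 1) 1).map (· + 1) := by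
          have := pv_pyRange_shift 1 ((c : Int) + 1)
          simpa using this
        rw [hsplit, hshift]
        simp only [List.all_cons, List.all_map, Function.comp_def, hmem, decide_true,
          Bool.true_and]
        have hfun : (fun t => decide ((x + 1 + t, y - 1 - t) ∈ mts))
            = (fun t => decide ((x + (t + 1), y - (t + 1)) ∈ mts)) := by
          funext t
          have h1 : x + 1 + t = x + (t + 1) := by ring
          have h2 : y - 1 - t = y - (t + 1) := by ring
          rw [h1, h2]
        rw [hfun]
        have hv : x + 1 + (c : Int) + 1 = x + ((c : Int) + 1) + 1 := by ring
        rw [hv]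
      · rw [show pvCmsGo mts x y (f+1) = none by simp [pvCmsGo, hne, hmem]]
        have h1 : (1 : Int) ∈ PySem.List.pyRange 1 ((c : Int) + 1 + 1) 1 := by
          rw [PySem.List.mem_pyRange_one]; omega
        have hnall : ¬ ((PySem.List.pyRange 1 ((c : Int) + 1 + 1) 1).all
            (fun t => decide ((x + t, y - t) ∈ mts)) = true) := by
          rw [List.all_eq_true]
          intro hall
          have := hall 1 h1
          simp only [decide_eq_true_eq] at this
          exact hmem (by simpa using this)
        rw [if_neg hnall]

lemma pv_cms_eq (mts : List (Int × Int)) (x y : Int) (c : Nat) (h : y = x + 2 * (c : Int) + 1) :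
    calculate_mirror_start mts (x, y) =
      if (PySem.List.pyRange 1 ((c : Int) + 1) 1).all (fun t => decide ((x + t, y - t) ∈ mts))
      then some (x + (c : Int) + 1) else none := by
  unfold calculate_mirror_start
  exact pvCmsGo_eq mts c x y _ h (by simp; omega)

lemma pvEdgeOf_spec (n m : Int) :
    pvEdgeOf n m = (m - min m (n - m), m + min m (n - m) - 1) := by
  unfold pvEdgeOf
  split_ifs with h
  · have hmin : min m (n - m) = m := min_eq_left (by omega)
    rw [hmin, Prod.mk.injEq]
    constructor <;> omega
  · have hmin : min m (n - m) = n - m := min_eq_right (by omega)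
    rw [hmin, Prod.mk.injEq]
    constructor <;> omega

lemma pvCorr (e : Int → Int → Bool) (n mult : Int) (forb : Option Int) :
    ∀ ms : List Int, (∀ m ∈ ms, 1 ≤ m ∧ m < n) →
    pvTryEdges (pvMatchesA e n) mult forb
        ((ms.filter (fun m => e (pvEdgeOf n m).1 (pvEdgeOf n m).2)).map (pvEdgeOf n))
      = pvScanGen e n mult forb ms := by
  intro ms
  induction ms with
  | nil => intro _; rfl
  | cons m ms ih =>
    intro hms
    obtain ⟨hm1, hm2⟩ := hms m List.mem_cons_self
    have hih := ih (fun x hx => hms x (List.mem_cons_of_mem m hx))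
    have hk1 : 1 ≤ min m (n - m) := by omega
    set k := min m (n - m) with hk
    have hedge : pvEdgeOf n m = (m - k, m + k - 1) := pvEdgeOf_spec n m
    have hx0 : 0 ≤ m - k := by omega
    have hyn : m + k - 1 ≤ n - 1 := by omega
    -- the B-side test contains the edge pair at d = k - 1
    have hedge_mem : (k - 1) ∈ PySem.List.pyRange 0 k 1 := by
      rw [PySem.List.mem_pyRange_one]; omega
    by_cases he : e (m - k) (m + k - 1) = true
    · -- edge pair matches: A walks inward from it
      rw [List.filter_cons]
      rw [show (e (pvEdgeOf n m).1 (pvEdgeOf n m).2) = true by rw [hedge]; exact he]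
      simp only [if_true, List.map_cons]
      rw [hedge]
      simp only [pvTryEdges]
      rw [pv_cms_eq (pvMatchesA e n) (m - k) (m + k - 1) (k - 1).toNat (by omega)]
      -- identify the two "all" tests
      have hchain : (PySem.List.pyRange 1 (((k-1).toNat : Int) + 1) 1).all
            (fun t => decide ((m - k + t, m + k - 1 - t) ∈ pvMatchesA e n))
          = (PySem.List.pyRange 0 k 1).all (fun d => e (m - 1 - d) (m + d)) := by
        have hkk : ((k - 1).toNat : Int) + 1 = k := by omega
        rw [hkk]
        have hiff : ((PySem.List.pyRange 1 k 1).all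
              (fun t => decide ((m - k + t, m + k - 1 - t) ∈ pvMatchesA e n)) = true)
            ↔ ((PySem.List.pyRange 0 k 1).all (fun d => e (m - 1 - d) (m + d)) = true) := by
          simp only [List.all_eq_true, PySem.List.mem_pyRange_one, decide_eq_true_eq]
          constructor
          · intro hchainmem d hd
            by_cases hdk : d = k - 1
            · subst hdk
              rw [show m - 1 - (k - 1) = m - k by ring, show m + (k - 1) = m + k - 1 by ring]
              exact he
            · have ht := hchainmem (k - 1 - d) (by omega)
              rw [pv_mem_matchesA] at ht
              have h1 : m - k + (k - 1 - d) = m - 1 - d := by ring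
              have h2 : m + k - 1 - (k - 1 - d) = m + d := by ring
              rw [h1, h2] at ht
              exact ht.2.2.2.2
          · intro hall t ht
            rw [pv_mem_matchesA]
            have hed := hall (k - 1 - t) (by omega)
            have h1 : m - 1 - (k - 1 - t) = m - k + t := by ring
            have h2 : m + (k - 1 - t) = m + k - 1 - t := by ring
            rw [h1, h2] at hed
            exact ⟨by omega, by omega, by omega, ⟨k - 1 - t, by ring⟩, hed⟩
        cases hL : ((PySem.List.pyRange 1 k 1).all
            (fun t => decide ((m - k + t, m + k - 1 - t) ∈ pvMatchesA e n))) with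
        | true => exact (hiff.mp hL).symm
        | false =>
          cases hR : ((PySem.List.pyRange 0 k 1).all (fun d => e (m - 1 - d) (m + d))) with
          | true => exact absurd (hiff.mpr hR) (by simp [hL])
          | false => rfl
      rw [hchain]
      by_cases hAll : (PySem.List.pyRange 0 k 1).all (fun d => e (m - 1 - d) (m + d)) = true
      · rw [if_pos hAll]
        have hm0 : m - k + ((k-1).toNat : Int) + 1 = m := by omega
        rw [hm0]
        simp only [pvScanGen]
        rw [← hk, if_pos hAll]
        by_cases hforb : forb = none ∨ some (m * mult) ≠ forb
        · rw [if_pos (⟨by omega, hforb⟩ : m ≠ 0 ∧ (forb = none ∨ some (m * mult) ≠ forb)),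
            if_pos hforb]
        · rw [if_neg (fun hcon => hforb hcon.2), if_neg hforb]
          exact hih
      · rw [if_neg hAll]
        simp only [pvScanGen]
        rw [← hk, if_neg hAll]
        exact hih
    · -- edge pair does not match: A never considers m, B's test fails at d = k - 1
      rw [List.filter_cons]
      rw [show (e (pvEdgeOf n m).1 (pvEdgeOf n m).2) = false by
        rw [hedge]; exact Bool.eq_false_iff.mpr he]
      simp only [Bool.false_eq_true, if_false]
      have hAll : ¬ ((PySem.List.pyRange 0 k 1).all (fun d => e (m - 1 - d) (m + d)) = true) := by
        rw [List.all_eq_true]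
        intro hall
        have := hall (k - 1) hedge_mem
        rw [show m - 1 - (k - 1) = m - k by ring, show m + (k - 1) = m + k - 1 by ring] at this
        exact he this
      simp only [pvScanGen]
      rw [← hk, if_neg hAll]
      exact hih

lemma pvMaster (e : Int → Int → Bool) (n mult : Int) (forb : Option Int) (hn : 0 ≤ n) :
    (if (pvMatchesA e n).length > 0 then
        pvTryEdges (pvMatchesA e n) mult forb
          ((pvMatchesA e n).filter (fun x => decide (x.1 = 0 ∨ x.2 = n - 1)))
      else none)
    = pvScanGen e n mult forb (PySem.List.pyRange 1 n 1) := by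
  have hcol : (if (pvMatchesA e n).length > 0 then
      pvTryEdges (pvMatchesA e n) mult forb
        ((pvMatchesA e n).filter (fun x => decide (x.1 = 0 ∨ x.2 = n - 1)))
    else none)
    = pvTryEdges (pvMatchesA e n) mult forb
        ((pvMatchesA e n).filter (fun x => decide (x.1 = 0 ∨ x.2 = n - 1))) := by
    cases hmt : pvMatchesA e n with
    | nil => simp [pvTryEdges]
    | cons p l => simp
  rw [hcol]
  by_cases hpos : 0 < n
  · rw [pvEdges_eq e n hpos]
    exact pvCorr e n mult forb _ (fun m hm => by rw [PySem.List.mem_pyRange_one] at hm; omega)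
  · have hn0 : n = 0 := by omega
    subst hn0
    have hm : pvMatchesA e 0 = [] := by
      unfold pvMatchesA
      rw [PySem.List.pyRange_one_eq_nil (by norm_num)]
      rfl
    rw [hm, PySem.List.pyRange_one_eq_nil (by norm_num)]
    rfl

lemma pvScanB_eq_gen {α : Type} [DecidableEq α] (lines : List α) (mult : Int) (forb : Option Int) :
    ∀ ms : List Int, pvScanB lines mult forb ms
      = pvScanGen (fun a b => decide (PySem.List.pyGet? lines a = PySem.List.pyGet? lines b))
          (lines.length : Int) mult forb ms := by
  intro ms
  induction ms with
  | nil => rfl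
  | cons m ms ih => simp only [pvScanB, pvScanGen, ih]

lemma pvScanGen_congr (e e' : Int → Int → Bool) (n mult : Int) (forb : Option Int)
    (h : ∀ a b : Int, 0 ≤ a → a < b → b < n → e a b = e' a b) :
    ∀ ms : List Int, (∀ m ∈ ms, 1 ≤ m ∧ m < n) →
    pvScanGen e n mult forb ms = pvScanGen e' n mult forb ms := by
  intro ms
  induction ms with
  | nil => intro _; rfl
  | cons m ms ih =>
    intro hms
    obtain ⟨hm1, hm2⟩ := hms m List.mem_cons_self
    have hih := ih (fun x hx => hms x (List.mem_cons_of_mem m hx))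
    have hall : (PySem.List.pyRange 0 (min m (n - m)) 1).all (fun d => e (m - 1 - d) (m + d))
        = (PySem.List.pyRange 0 (min m (n - m)) 1).all (fun d => e' (m - 1 - d) (m + d)) := by
      apply pv_all_congr
      intro d hd
      rw [PySem.List.mem_pyRange_one] at hd
      exact h _ _ (by omega) (by omega) (by omega)
    simp only [pvScanGen, hall, hih]

-- ===== VERDICT (by name: the statement is the Claim_ definition above) =====
theorem calculate_mirror_value_spec : Claim_equal_calculate_mirror_value := by
  intro map forb hdom hpre
  unfold Spec_calculate_mirror_value
  obtain ⟨hne, hlen⟩ := hpre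
  simp only [calculate_mirror_value, calculate_mirror_value_alt]
  set w : Int := PySem.Str.len ((PySem.List.pyGet? map 0).getD "") with hw
  set rows : List String := map.map (fun row => PySem.Str.slice row none (some w)) with hrows
  set cols : List (List Char) := (PySem.List.pyRange 0 w 1).map
    (fun i => rows.map (fun row => (PySem.Str.pyGet? row i).getD ' ')) with hcols
  have hn0 : 0 ≤ (map.length : Int) := by positivity
  have hw0 : 0 ≤ w := by rw [hw, PySem.Str.len_eq]; positivity
  have hlenr : (rows.length : Int) = (map.length : Int) := by rw [hrows, List.length_map]
  have hlenc : (cols.length : Int) = w := by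
    rw [hcols, List.length_map, PySem.List.length_pyRange_one]
    omega
  have hA1 : (if (pvMatchesA (fun i j => (PySem.List.pyRange 0 w 1).all
          (fun k => decide (pvCharAt map i k = pvCharAt map j k))) (map.length : Int)).length > 0 then
        pvTryEdges (pvMatchesA (fun i j => (PySem.List.pyRange 0 w 1).all
            (fun k => decide (pvCharAt map i k = pvCharAt map j k))) (map.length : Int)) 100 forb
          ((pvMatchesA (fun i j => (PySem.List.pyRange 0 w 1).all
            (fun k => decide (pvCharAt map i k = pvCharAt map j k))) (map.length : Int)).filter
            (fun x => decide (x.1 = 0 ∨ x.2 = (map.length : Int) - 1)))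
      else none)
      = pvScanB rows 100 forb (PySem.List.pyRange 1 (rows.length : Int) 1) := by
    rw [pvMaster _ (map.length : Int) 100 forb hn0]
    rw [pvScanGen_congr _ (fun a b => decide (PySem.List.pyGet? rows a = PySem.List.pyGet? rows b))
        (map.length : Int) 100 forb
        (fun a b ha hab hb => pv_row_eq map w rows hw hrows hne hlen a b ha hab hb) _
        (fun m hm => by rw [PySem.List.mem_pyRange_one] at hm; omega)]
    rw [pvScanB_eq_gen rows 100 forb, hlenr]
  have hA2 : (if (pvMatchesA (fun i j => (PySem.List.pyRange 0 (map.length : Int) 1).all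
          (fun k => decide (pvCharAt map k i = pvCharAt map k j))) w).length > 0 then
        pvTryEdges (pvMatchesA (fun i j => (PySem.List.pyRange 0 (map.length : Int) 1).all
            (fun k => decide (pvCharAt map k i = pvCharAt map k j))) w) 1 forb
          ((pvMatchesA (fun i j => (PySem.List.pyRange 0 (map.length : Int) 1).all
            (fun k => decide (pvCharAt map k i = pvCharAt map k j))) w).filter
            (fun x => decide (x.1 = 0 ∨ x.2 = w - 1)))
      else none)
      = pvScanB cols 1 forb (PySem.List.pyRange 1 (cols.length : Int) 1) := by
    rw [pvMaster _ w 1 forb hw0]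
    rw [pvScanGen_congr _ (fun a b => decide (PySem.List.pyGet? cols a = PySem.List.pyGet? cols b))
        w 1 forb
        (fun a b ha hab hb => pv_col_eq map w rows cols hw hrows hcols hne hlen a b ha hab hb) _
        (fun m hm => by rw [PySem.List.mem_pyRange_one] at hm; omega)]
    rw [pvScanB_eq_gen cols 1 forb, hlenc]
  rw [hA1, hA2]
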